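-- pv_equiv track=rewrite | github.com/jcolinpatrick/kryptos | scripts/e_s_94_keystream_structure.py | check_grid_pattern
-- ===== SOURCE A (Python) =====
-- from collections import Counter
--
-- W = 7
--
-- def check_grid_pattern(keystream):
--     """Check if key values correlate with grid position (row, col)."""
--     # Position p in output → grid row = p // 7, col = p % 7
--     row_groups = {}
--     col_groups = {}
--
--     for pos, kval in keystream:
--         r = pos // W
--         c = pos % W
--         row_groups.setdefault(r, []).append(kval)
--         col_groups.setdefault(c, []).append(kval)
--
--     # Check if same-column positions have consistent key mod something
--     col_consistency = {}
--     for c, vals in col_groups.items():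
--         if len(vals) >= 2:
--             diffs = [(vals[i + 1] - vals[i]) % 26 for i in range(len(vals) - 1)]
--             col_consistency[c] = Counter(diffs).most_common(1)[0] if diffs else None
--
--     return col_consistency
-- ===== SOURCE B (Python) =====
-- W = 7
--
-- def check_grid_pattern(keystream):
--     """Check if key values correlate with grid position (row, col)."""
--     # One pass: per column keep the last value seen and a running tally of
--     # consecutive (mod 26) differences; no per-column value lists are stored.
--     last = {}
--     counts = {}
--     for pos, kval in keystream:
--         c = pos % W
--         if c in last:
--             cnt = counts[c]
--             d = (kval - last[c]) % 26
--             cnt[d] = cnt.get(d, 0) + 1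
--         else:
--             counts[c] = {}
--         last[c] = kval
--     return {c: max(cnt.items(), key=lambda kv: kv[1])
--             for c, cnt in counts.items() if cnt}
-- ===== Notes on version B (the rewrite author's own statement) =====
-- stated objective: alternative
-- what changed: Single pass fusing grouping and differencing: per column B keeps only the last value seen and a running tally of consecutive mod-26 differences (no per-column value lists, no unused row grouping), then takes each tally's first maximum; A stores full per-column lists and rebuilds diff lists and Counters afterwards.
import Mathlib
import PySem

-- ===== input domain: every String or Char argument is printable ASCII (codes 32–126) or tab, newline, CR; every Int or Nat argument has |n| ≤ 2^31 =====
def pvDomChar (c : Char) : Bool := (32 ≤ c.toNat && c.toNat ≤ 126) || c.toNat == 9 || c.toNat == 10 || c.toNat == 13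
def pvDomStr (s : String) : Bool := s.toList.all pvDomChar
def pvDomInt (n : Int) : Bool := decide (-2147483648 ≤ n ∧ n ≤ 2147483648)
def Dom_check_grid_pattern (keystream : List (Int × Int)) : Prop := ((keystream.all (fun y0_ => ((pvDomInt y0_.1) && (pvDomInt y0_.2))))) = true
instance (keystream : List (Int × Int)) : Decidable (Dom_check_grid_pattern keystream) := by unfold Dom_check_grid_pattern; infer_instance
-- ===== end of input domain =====

-- B fuses A's two passes into one, keeping per column only the last value and a running
-- tally of consecutive mod-26 differences (alternative decomposition; return value only).

-- ===== PORT A =====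
def check_grid_pattern (keystream : List (Int × Int)) : List (Int × Option (Int × Int)) :=
  -- row_groups (unused afterwards, kept as in A) and col_groups, built by setdefault+append
  let groups := keystream.foldl
    (fun (st : PySem.Dict Int (List Int) × PySem.Dict Int (List Int)) pk =>
      ((st.1.modify (PySem.Int.floordiv pk.1 7) [] (fun l => l ++ [pk.2])),
       (st.2.modify (PySem.Int.mod pk.1 7) [] (fun l => l ++ [pk.2]))))
    (PySem.Dict.empty, PySem.Dict.empty)
  let col_consistency := groups.2.items.foldl
    (fun (d : PySem.Dict Int (Option (Int × Int))) cv =>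
      if 2 ≤ cv.2.length then
        let diffs := (PySem.List.pyRange 0 ((cv.2.length : Int) - 1) 1).map
          (fun i => PySem.Int.mod (PySem.List.pyGetD cv.2 (i + 1) 0 - PySem.List.pyGetD cv.2 i 0) 26)
        -- Counter(diffs).most_common(1)[0]: first item with maximal count
        d.insert cv.1 (if diffs ≠ [] then
            some (PySem.List.maxD (PySem.Dict.counter diffs).items (fun kv => kv.2) (0, 0))
          else none)
      else d)
    PySem.Dict.empty
  col_consistency.items

-- ===== PORT B =====
def check_grid_pattern_alt (keystream : List (Int × Int)) : List (Int × Option (Int × Int)) :=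
  let st := keystream.foldl
    (fun (st : PySem.Dict Int Int × PySem.Dict Int (PySem.Dict Int Int)) pk =>
      let c := PySem.Int.mod pk.1 7
      let counts :=
        match st.1.get? c with
        | some lastv =>
            st.2.modify c PySem.Dict.empty
              (fun cnt =>
                let d := PySem.Int.mod (pk.2 - lastv) 26
                cnt.insert d (cnt.getD d 0 + 1))
        | none => st.2.insert c PySem.Dict.empty
      (st.1.insert c pk.2, counts))
    (PySem.Dict.empty, PySem.Dict.empty)
  -- {c: max(cnt.items(), key=count) for c, cnt in counts.items() if cnt}
  (st.2.items.filter (fun p => !p.2.items.isEmpty)).map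
    (fun p => (p.1, some (PySem.List.maxD p.2.items (fun kv => kv.2) (0, 0))))

-- ===== PRECONDITION & SPEC =====
def Spec_check_grid_pattern (keystream : List (Int × Int)) (out : List (Int × Option (Int × Int))) : Prop := out = check_grid_pattern_alt keystream
instance (keystream : List (Int × Int)) (out : List (Int × Option (Int × Int))) : Decidable (Spec_check_grid_pattern keystream out) := by unfold Spec_check_grid_pattern; infer_instance

-- ===== CLAIM (what is proved, stated in full; the proofs are below) =====
def Claim_equal_check_grid_pattern : Prop := ∀ (keystream : List (Int × Int)), Dom_check_grid_pattern keystream → Spec_check_grid_pattern keystream (check_grid_pattern keystream)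

-- ===== LEMMAS AND PROOFS =====

def pvCol (pk : Int × Int) : Int := PySem.Int.mod pk.1 7

def pvVals (ks : List (Int × Int)) (c : Int) : List Int :=
  (ks.filter (fun pk => pvCol pk == c)).map (fun pk => pk.2)

def pvDiffs : List Int → List Int
  | [] => []
  | [_] => []
  | x :: y :: t => PySem.Int.mod (y - x) 26 :: pvDiffs (y :: t)

lemma pvGetD_cast_succ (xs : List Int) (k : Nat) :
    PySem.List.pyGetD xs ((k : Int) + 1) 0 = xs.getD (k + 1) 0 := by
  rw [show ((k : Int) + 1) = ((k + 1 : Nat) : Int) by push_cast; ring, PySem.List.pyGetD_natCast]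

lemma pvAux2 : ∀ (t : List Int) (x : Int),
    (List.range t.length).map
      (fun k => PySem.Int.mod ((x :: t).getD (k + 1) 0 - (x :: t).getD k 0) 26) = pvDiffs (x :: t)
  | [], _ => rfl
  | y :: t', x => by
    rw [show (y :: t').length = t'.length + 1 from rfl, List.range_succ_eq_map]
    simp only [List.map_cons, List.map_map]
    refine congrArg₂ _ ?_ ?_
    · simp
    · have := pvAux2 t' y
      rw [← this]
      apply List.map_congr_left
      intro k _
      simp

lemma pvDiffs_eq (l : List Int) :
    (PySem.List.pyRange 0 ((l.length : Int) - 1) 1).map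
      (fun i => PySem.Int.mod (PySem.List.pyGetD l (i + 1) 0 - PySem.List.pyGetD l i 0) 26)
      = pvDiffs l := by
  cases l with
  | nil => decide
  | cons x t =>
    rw [show ((x :: t).length : Int) - 1 = (t.length : Nat) by push_cast [List.length_cons]; ring,
      PySem.List.pyRange_zero_natCast, List.map_map]
    rw [← pvAux2 t x]
    apply List.map_congr_left
    intro k _
    simp only [Function.comp_apply, pvGetD_cast_succ, PySem.List.pyGetD_natCast]

lemma pvDiffs_ne_nil {l : List Int} (h : 2 ≤ l.length) : pvDiffs l ≠ [] := by
  match l, h with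
  | x :: y :: t, _ => simp [pvDiffs]

-- A's first loop (pair of dicts) and second loop, named for the proofs
def pvA1 (st : PySem.Dict Int (List Int) × PySem.Dict Int (List Int)) (pk : Int × Int) :
    PySem.Dict Int (List Int) × PySem.Dict Int (List Int) :=
  ((st.1.modify (PySem.Int.floordiv pk.1 7) [] (fun l => l ++ [pk.2])),
   (st.2.modify (PySem.Int.mod pk.1 7) [] (fun l => l ++ [pk.2])))

def pvAval (cv : Int × List Int) : Option (Int × Int) :=
  let diffs := (PySem.List.pyRange 0 ((cv.2.length : Int) - 1) 1).map
    (fun i => PySem.Int.mod (PySem.List.pyGetD cv.2 (i + 1) 0 - PySem.List.pyGetD cv.2 i 0) 26)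
  if diffs ≠ [] then
    some (PySem.List.maxD (PySem.Dict.counter diffs).items (fun kv => kv.2) (0, 0))
  else none

def pvAstep (d : PySem.Dict Int (Option (Int × Int))) (cv : Int × List Int) :
    PySem.Dict Int (Option (Int × Int)) :=
  if 2 ≤ cv.2.length then d.insert cv.1 (pvAval cv) else d

def pvCG (ks : List (Int × Int)) : PySem.Dict Int (List Int) :=
  ks.foldl (fun d pk => d.modify (PySem.Int.mod pk.1 7) [] (fun l => l ++ [pk.2])) PySem.Dict.empty

lemma pvCG_keys (ks : List (Int × Int)) : (pvCG ks).keys = PySem.Set.ofList (ks.map pvCol) := by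
  unfold pvCG
  rw [PySem.Dict.keys_foldl_modify_key ks (fun pk => PySem.Int.mod pk.1 7) []
    (fun _ pk l => l ++ [pk.2]) PySem.Dict.empty]
  rw [PySem.Dict.keys_empty]
  rfl

lemma pvCG_nodup (ks : List (Int × Int)) : (pvCG ks).keys.Nodup :=
  PySem.Dict.nodup_keys_foldl_modify_key ks (fun pk => PySem.Int.mod pk.1 7) []
    (fun _ pk l => l ++ [pk.2]) PySem.Dict.empty PySem.Dict.nodup_keys_empty

lemma pvCG_getD (ks : List (Int × Int)) (c : Int) : (pvCG ks).getD c [] = pvVals ks c := by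
  unfold pvCG
  rw [show (ks.foldl (fun d pk => d.modify (PySem.Int.mod pk.1 7) [] (fun l => l ++ [pk.2]))
      PySem.Dict.empty)
    = ((ks.map (fun pk => (pvCol pk, pk.2))).foldl
        (fun d p => d.modify p.1 [] (fun l => l ++ [p.2])) PySem.Dict.empty) from
    (List.foldl_map (f := fun pk => (pvCol pk, pk.2))
      (g := fun d p => d.modify p.1 [] (fun l => l ++ [p.2]))
      (l := ks) (init := PySem.Dict.empty)).symm]
  rw [PySem.Dict.getD_foldl_modify_append]
  simp only [PySem.Dict.getD_empty, List.nil_append, List.filter_map, List.map_map]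
  unfold pvVals
  congr 1

lemma pvCG_items (ks : List (Int × Int)) :
    (pvCG ks).items = (PySem.Set.ofList (ks.map pvCol)).map (fun c => (c, pvVals ks c)) := by
  rw [PySem.Dict.items_eq_map_keys (pvCG ks) (pvCG_nodup ks) [], pvCG_keys]
  exact List.map_congr_left (fun c _ => by rw [pvCG_getD])

lemma pvA_loop : ∀ (l : List (Int × List Int)) (d : PySem.Dict Int (Option (Int × Int))),
    (l.map Prod.fst).Nodup → (∀ p ∈ l, d.contains p.1 = false) →
    (l.foldl pvAstep d).items
      = d.items ++ (l.filter (fun cv => decide (2 ≤ cv.2.length))).map (fun cv => (cv.1, pvAval cv))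
  | [], d, _, _ => by simp
  | p :: t, d, hnd, hfresh => by
    simp only [List.map_cons, List.nodup_cons] at hnd
    by_cases hp : 2 ≤ p.2.length
    · have hfresh' : ∀ q ∈ t, (d.insert p.1 (pvAval p)).contains q.1 = false := by
        intro q hq
        rw [PySem.Dict.contains_insert]
        have : q.1 ≠ p.1 := fun h => hnd.1 (h ▸ List.mem_map_of_mem hq)
        simp [this, hfresh q (List.mem_cons_of_mem _ hq)]
      rw [List.foldl_cons, show pvAstep d p = d.insert p.1 (pvAval p) from by
          simp [pvAstep, hp],
        pvA_loop t _ hnd.2 hfresh',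
        PySem.Dict.items_insert_of_not_contains d _ (hfresh p List.mem_cons_self)]
      simp [hp]
    · rw [List.foldl_cons, show pvAstep d p = d from by simp [pvAstep, hp],
        pvA_loop t d hnd.2 (fun q hq => hfresh q (List.mem_cons_of_mem _ hq))]
      simp [hp]

def pvForm (ks : List (Int × Int)) : List (Int × Option (Int × Int)) :=
  ((PySem.Set.ofList (ks.map pvCol)).filter (fun c => 2 ≤ (pvVals ks c).length)).map
    (fun c => (c, some (PySem.List.maxD (PySem.Dict.counter (pvDiffs (pvVals ks c))).items
                          (fun kv => kv.2) (0, 0))))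

theorem pvA_eq_form (ks : List (Int × Int)) : check_grid_pattern ks = pvForm ks := by
  have h0 : check_grid_pattern ks
      = ((ks.foldl pvA1 (PySem.Dict.empty, PySem.Dict.empty)).2.items.foldl pvAstep
          PySem.Dict.empty).items := rfl
  rw [h0, show ks.foldl pvA1 (PySem.Dict.empty, PySem.Dict.empty)
      = (ks.foldl (fun d pk => d.modify (PySem.Int.floordiv pk.1 7) [] (fun l => l ++ [pk.2]))
          PySem.Dict.empty, pvCG ks) from
    PySem.List.foldl_prod_mk
      (fun d pk => d.modify (PySem.Int.floordiv pk.1 7) [] (fun l => l ++ [pk.2]))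
      (fun d pk => d.modify (PySem.Int.mod pk.1 7) [] (fun l => l ++ [pk.2]))
      ks PySem.Dict.empty PySem.Dict.empty]
  rw [pvCG_items ks]
  rw [pvA_loop _ PySem.Dict.empty
    (by
      rw [List.map_map]
      simp only [Function.comp_def, List.map_id_fun', id]
      exact PySem.Set.nodup_ofList (ks.map pvCol))
    (fun p _ => PySem.Dict.contains_empty p.1)]
  simp only [List.filter_map, List.map_map]
  unfold pvForm
  rw [show PySem.Dict.empty.items ++
      ((PySem.Set.ofList (ks.map pvCol)).filter
          ((fun cv => decide (2 ≤ cv.2.length)) ∘ fun c => (c, pvVals ks c))).map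
        ((fun cv => (cv.1, pvAval cv)) ∘ fun c => (c, pvVals ks c))
    = ((PySem.Set.ofList (ks.map pvCol)).filter
          (fun c => decide (2 ≤ (pvVals ks c).length))).map
        (fun c => (c, pvAval (c, pvVals ks c))) from rfl]
  apply List.map_congr_left
  intro c hc
  have h2 : 2 ≤ (pvVals ks c).length := by simpa using (List.mem_filter.mp hc).2
  simp only [pvAval]
  rw [pvDiffs_eq (pvVals ks c), if_pos (pvDiffs_ne_nil h2)]

def pvBstep (st : PySem.Dict Int Int × PySem.Dict Int (PySem.Dict Int Int)) (pk : Int × Int) :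
    PySem.Dict Int Int × PySem.Dict Int (PySem.Dict Int Int) :=
  let c := PySem.Int.mod pk.1 7
  let counts :=
    match st.1.get? c with
    | some lastv =>
        st.2.modify c PySem.Dict.empty
          (fun cnt =>
            let d := PySem.Int.mod (pk.2 - lastv) 26
            cnt.insert d (cnt.getD d 0 + 1))
    | none => st.2.insert c PySem.Dict.empty
  (st.1.insert c pk.2, counts)

def pvBfold (ks : List (Int × Int)) : PySem.Dict Int Int × PySem.Dict Int (PySem.Dict Int Int) :=
  ks.foldl pvBstep (PySem.Dict.empty, PySem.Dict.empty)

lemma pvVals_append (ks : List (Int × Int)) (pk : Int × Int) (c : Int) :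
    pvVals (ks ++ [pk]) c = if pvCol pk = c then pvVals ks c ++ [pk.2] else pvVals ks c := by
  unfold pvVals
  rw [List.filter_append, List.map_append]
  by_cases h : pvCol pk = c <;> simp [h]

lemma pvVals_ne_nil_iff (ks : List (Int × Int)) (c : Int) :
    pvVals ks c ≠ [] ↔ c ∈ ks.map pvCol := by
  unfold pvVals
  simp only [ne_eq, List.map_eq_nil_iff, List.filter_eq_nil_iff, List.mem_map]
  constructor
  · intro h
    push Not at h
    obtain ⟨pk, hpk, hc⟩ := h
    exact ⟨pk, hpk, by simpa using hc⟩
  · rintro ⟨pk, hpk, rfl⟩ h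
    exact (by simpa using h pk hpk)

lemma pvDiffs_snoc : ∀ (l : List Int) (v y : Int), l.getLast? = some v →
    pvDiffs (l ++ [y]) = pvDiffs l ++ [PySem.Int.mod (y - v) 26]
  | [], v, y, h => by simp at h
  | [x], v, y, h => by
    simp only [List.getLast?_singleton, Option.some.injEq] at h
    subst h; rfl
  | x :: x' :: t, v, y, h => by
    rw [show (x :: x' :: t).getLast? = (x' :: t).getLast? from (List.getLast?_cons_cons ..)] at h
    show PySem.Int.mod (x' - x) 26 :: pvDiffs ((x' :: t) ++ [y]) = _
    rw [pvDiffs_snoc (x' :: t) v y h]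
    rfl

lemma pvSet_keys (ks : List (Int × Int))
    (h : (pvBfold ks).2.items
      = (PySem.Set.ofList (ks.map pvCol)).map
          (fun c => (c, PySem.Dict.counter (pvDiffs (pvVals ks c))))) :
    (pvBfold ks).2.keys = PySem.Set.ofList (ks.map pvCol) := by
  show (pvBfold ks).2.items.map Prod.fst = _
  rw [h, List.map_map]
  simp [Function.comp_def]

theorem pvB_inv (ks : List (Int × Int)) :
    (∀ c, (pvBfold ks).1.get? c = (pvVals ks c).getLast?) ∧
    (pvBfold ks).2.items
      = (PySem.Set.ofList (ks.map pvCol)).map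
          (fun c => (c, PySem.Dict.counter (pvDiffs (pvVals ks c)))) := by
  induction ks using List.reverseRecOn with
  | nil =>
    constructor
    · intro c; rfl
    · rfl
  | append_singleton ks pk ih =>
    obtain ⟨h1, h2⟩ := ih
    have hfold : pvBfold (ks ++ [pk]) = pvBstep (pvBfold ks) pk := by
      unfold pvBfold; rw [List.foldl_append]; rfl
    have hkeys := pvSet_keys ks h2
    have hnodup : (pvBfold ks).2.keys.Nodup := by
      rw [hkeys]; exact PySem.Set.nodup_ofList _
    have hcols : PySem.Set.ofList ((ks ++ [pk]).map pvCol)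
        = PySem.Set.add (PySem.Set.ofList (ks.map pvCol)) (pvCol pk) := by
      rw [List.map_append, PySem.Set.ofList_append]; rfl
    cases hget : (pvBfold ks).1.get? (pvCol pk) with
    | none =>
      have hvals : pvVals ks (pvCol pk) = [] := by
        rw [← List.getLast?_eq_none_iff, ← h1, hget]
      have hnotmem : pvCol pk ∉ ks.map pvCol := by
        intro hm
        exact (pvVals_ne_nil_iff ks (pvCol pk)).mpr hm hvals
      have hnotmemset : pvCol pk ∉ PySem.Set.ofList (ks.map pvCol) :=
        fun hm => hnotmem ((PySem.Set.mem_ofList _ _).mp hm)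
      have hstep : pvBstep (pvBfold ks) pk
          = ((pvBfold ks).1.insert (pvCol pk) pk.2,
             (pvBfold ks).2.insert (pvCol pk) PySem.Dict.empty) := by
        rw [show pvBstep (pvBfold ks) pk
            = ((pvBfold ks).1.insert (pvCol pk) pk.2,
               match (pvBfold ks).1.get? (pvCol pk) with
               | some lastv =>
                   (pvBfold ks).2.modify (pvCol pk) PySem.Dict.empty
                     (fun cnt => cnt.insert (PySem.Int.mod (pk.2 - lastv) 26)
                       (cnt.getD (PySem.Int.mod (pk.2 - lastv) 26) 0 + 1))
               | none => (pvBfold ks).2.insert (pvCol pk) PySem.Dict.empty) from rfl, hget]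
      have hcontains : (pvBfold ks).2.contains (pvCol pk) = false := by
        rw [← Bool.not_eq_true, PySem.Dict.contains_iff_mem_keys, hkeys]
        exact hnotmemset
      constructor
      · intro c
        rw [hfold, hstep, PySem.Dict.get?_insert, pvVals_append]
        by_cases hc : c = pvCol pk
        · subst hc; rw [if_pos rfl, if_pos rfl, List.getLast?_concat]
        · rw [if_neg hc, if_neg (fun h => hc (Eq.symm h)), h1 c]
      · rw [hfold, hstep, PySem.Dict.items_insert_of_not_contains _ _ hcontains, h2, hcols]
        rw [show PySem.Set.add (PySem.Set.ofList (ks.map pvCol)) (pvCol pk)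
            = PySem.Set.ofList (ks.map pvCol) ++ [pvCol pk] from by
          unfold PySem.Set.add
          rw [if_neg (by simpa [PySem.Set.contains, List.contains_iff_mem] using hnotmemset)]]
        rw [List.map_append]
        refine congrArg₂ _ (List.map_congr_left ?_) ?_
        · intro c hc
          have hne : c ≠ pvCol pk := fun h => hnotmemset (h ▸ hc)
          rw [pvVals_append, if_neg (fun h => hne h.symm)]
        · simp only [List.map_cons, List.map_nil]
          rw [pvVals_append, if_pos rfl, hvals]
          rfl
    | some lastv =>
      have hlast : (pvVals ks (pvCol pk)).getLast? = some lastv := by rw [← h1, hget]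
      have hne : pvVals ks (pvCol pk) ≠ [] := by
        intro h; rw [h] at hlast; simp at hlast
      have hmem : pvCol pk ∈ ks.map pvCol := (pvVals_ne_nil_iff ks (pvCol pk)).mp hne
      have hmemset : pvCol pk ∈ PySem.Set.ofList (ks.map pvCol) :=
        (PySem.Set.mem_ofList _ _).mpr hmem
      have hcontains : (pvBfold ks).2.contains (pvCol pk) = true := by
        rw [PySem.Dict.contains_iff_mem_keys, hkeys]; exact hmemset
      have hgetD : (pvBfold ks).2.getD (pvCol pk) PySem.Dict.empty
          = PySem.Dict.counter (pvDiffs (pvVals ks (pvCol pk))) := by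
        refine PySem.Dict.getD_of_mem_items _ ?_ hnodup _
        rw [h2]
        exact List.mem_map_of_mem hmemset
      have hstep : pvBstep (pvBfold ks) pk
          = ((pvBfold ks).1.insert (pvCol pk) pk.2,
             (pvBfold ks).2.insert (pvCol pk)
               (PySem.Dict.counter
                 (pvDiffs (pvVals ks (pvCol pk)) ++ [PySem.Int.mod (pk.2 - lastv) 26]))) := by
        rw [show pvBstep (pvBfold ks) pk
            = ((pvBfold ks).1.insert (pvCol pk) pk.2,
               match (pvBfold ks).1.get? (pvCol pk) with
               | some lastv =>
                   (pvBfold ks).2.modify (pvCol pk) PySem.Dict.empty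
                     (fun cnt => cnt.insert (PySem.Int.mod (pk.2 - lastv) 26)
                       (cnt.getD (PySem.Int.mod (pk.2 - lastv) 26) 0 + 1))
               | none => (pvBfold ks).2.insert (pvCol pk) PySem.Dict.empty) from rfl, hget]
        show ((pvBfold ks).1.insert (pvCol pk) pk.2,
          (pvBfold ks).2.modify (pvCol pk) PySem.Dict.empty
            (fun cnt => cnt.insert (PySem.Int.mod (pk.2 - lastv) 26)
              (cnt.getD (PySem.Int.mod (pk.2 - lastv) 26) 0 + 1))) = _
        rw [show ((pvBfold ks).2.modify (pvCol pk) PySem.Dict.empty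
            (fun cnt => cnt.insert (PySem.Int.mod (pk.2 - lastv) 26)
              (cnt.getD (PySem.Int.mod (pk.2 - lastv) 26) 0 + 1)))
          = ((pvBfold ks).2.insert (pvCol pk)
              (((pvBfold ks).2.getD (pvCol pk) PySem.Dict.empty).insert
                (PySem.Int.mod (pk.2 - lastv) 26)
                (((pvBfold ks).2.getD (pvCol pk) PySem.Dict.empty).getD
                  (PySem.Int.mod (pk.2 - lastv) 26) 0 + 1))) from rfl]
        rw [hgetD, PySem.Dict.counter_append_singleton]
        rfl
      constructor
      · intro c
        rw [hfold, hstep, PySem.Dict.get?_insert, pvVals_append]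
        by_cases hc : c = pvCol pk
        · subst hc; rw [if_pos rfl, if_pos rfl, List.getLast?_concat]
        · rw [if_neg hc, if_neg (fun h => hc (Eq.symm h)), h1 c]
      · rw [hfold, hstep, PySem.Dict.items_insert_of_contains _ _ hcontains, h2, hcols]
        rw [show PySem.Set.add (PySem.Set.ofList (ks.map pvCol)) (pvCol pk)
            = PySem.Set.ofList (ks.map pvCol) from by
          unfold PySem.Set.add
          rw [if_pos (by simpa [PySem.Set.contains, List.contains_iff_mem] using hmemset)]]
        rw [List.map_map]
        apply List.map_congr_left
        intro c hc
        simp only [Function.comp_apply]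
        by_cases hceq : c = pvCol pk
        · subst hceq
          simp only [beq_self_eq_true, if_true]
          rw [pvVals_append, if_pos rfl, pvDiffs_snoc _ lastv pk.2 hlast]
        · simp only [show (c == pvCol pk) = false from by simpa using hceq,
            Bool.false_eq_true, if_false]
          rw [pvVals_append, if_neg (fun h => hceq (Eq.symm h))]

lemma pvCnt_nonempty (l : List Int) :
    (!(PySem.Dict.counter (pvDiffs l)).items.isEmpty) = decide (2 ≤ l.length) := by
  match l with
  | [] => rfl
  | [x] => rfl
  | x :: y :: t =>
    have hne : (PySem.Dict.counter (pvDiffs (x :: y :: t))).items ≠ [] := by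
      rw [PySem.Dict.items_counter]
      intro h
      rw [List.map_eq_nil_iff] at h
      have hm : PySem.Int.mod (y - x) 26 ∈ PySem.Set.ofList (pvDiffs (x :: y :: t)) :=
        (PySem.Set.mem_ofList (pvDiffs (x :: y :: t)) (PySem.Int.mod (y - x) 26)).mpr
          (by simp [pvDiffs])
      rw [h] at hm
      exact (List.not_mem_nil hm).elim
    rw [show decide (2 ≤ (x :: y :: t).length) = true from by simp]
    simpa [List.isEmpty_iff] using hne

theorem pvB_eq_form (ks : List (Int × Int)) : check_grid_pattern_alt ks = pvForm ks := by
  have h0 : check_grid_pattern_alt ks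
      = ((pvBfold ks).2.items.filter (fun p => !p.2.items.isEmpty)).map
          (fun p => (p.1, some (PySem.List.maxD p.2.items (fun kv => kv.2) (0, 0)))) := rfl
  rw [h0, (pvB_inv ks).2, List.filter_map, List.map_map]
  unfold pvForm
  rw [List.filter_congr (fun c _ => by
    show ((fun p : Int × PySem.Dict Int Int => !p.2.items.isEmpty)
      ((c, PySem.Dict.counter (pvDiffs (pvVals ks c))))) = _
    exact pvCnt_nonempty (pvVals ks c))]
  rfl

-- ===== VERDICT (by name: the statement is the Claim_ definition above) =====
theorem check_grid_pattern_spec : Claim_equal_check_grid_pattern := by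
  intro ks _
  unfold Spec_check_grid_pattern
  rw [pvA_eq_form, pvB_eq_form]
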